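-- pv_equiv track=rewrite | github.com/federico-demarchi/training | src/exercise_1_maze/part_5_maze_checker.py | find_openings
-- ===== SOURCE A (Python) =====
-- def make_dict(maze):
--     return {(row_idx, col_idx): tile for (row_idx, row) in enumerate(maze) for (col_idx, tile) in enumerate(row)}
--
-- def find_openings(maze):
--     maze_dict = make_dict(maze)
--     openings = []
--     for row_idx, row in enumerate(maze):
--         for col_idx, tile in enumerate(row):
--             if row_idx == 0 or row_idx == len(maze) - 1:
--                 current = (row_idx, col_idx)
--                 if maze_dict[current] == "NP":
--                     continue
--                 neighbor1, neighbor2 = find_neighbors(current, maze_dict)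
--                 if maze_dict.get(neighbor1) is None or maze_dict.get(neighbor2) is None:
--                     openings.append(current)
--             else:
--                 if col_idx == 0 or col_idx == len(row) - 1:
--                     current = (row_idx, col_idx)
--                     if maze_dict[current] == "NP":
--                         continue
--                     neighbor1, neighbor2 = find_neighbors(current, maze_dict)
--                     if maze_dict.get(neighbor1) is None or maze_dict.get(neighbor2) is None:
--                         openings.append(current)
--     if not openings:
--         return None
--     else:
--         return openings
--
-- def find_neighbors(current, maze_dict):
--     tile = maze_dict.get(current)
--     neighbor1, neighbor2 = None, None
--     if tile == 'NP':
--         neighbor1, neighbor2 = None, None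
--     elif tile == 'LR':
--         neighbor1, neighbor2 = (current[0], current[1] + 1), (current[0], current[1] - 1)
--     elif tile == 'BT':
--         neighbor1, neighbor2 = (current[0] + 1, current[1]), (current[0] - 1, current[1])
--     elif tile == 'TL':
--         neighbor1, neighbor2 = (current[0] - 1, current[1]), (current[0], current[1] - 1)
--     elif tile == 'TR':
--         neighbor1, neighbor2 = (current[0] - 1, current[1]), (current[0], current[1] + 1)
--     elif tile == 'BR':
--         neighbor1, neighbor2 = (current[0] + 1, current[1]), (current[0], current[1] + 1)
--     elif tile == 'BL':
--         neighbor1, neighbor2 = (current[0] + 1, current[1]), (current[0], current[1] - 1)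
--     return neighbor1, neighbor2
-- ===== SOURCE B (Python) =====
-- DELTAS = {
--     'LR': ((0, 1), (0, -1)),
--     'BT': ((1, 0), (-1, 0)),
--     'TL': ((-1, 0), (0, -1)),
--     'TR': ((-1, 0), (0, 1)),
--     'BR': ((1, 0), (0, 1)),
--     'BL': ((1, 0), (0, -1)),
-- }
--
--
-- def find_openings(maze):
--     nrows = len(maze)
--
--     def in_maze(r, c):
--         return 0 <= r < nrows and 0 <= c < len(maze[r])
--
--     def is_opening(r, c, row):
--         tile = row[c]
--         if tile == 'NP':
--             return False
--         deltas = DELTAS.get(tile)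
--         if deltas is None:
--             return True  # a tile with no known exits has no in-maze neighbors
--         return any(not in_maze(r + dr, c + dc) for dr, dc in deltas)
--
--     openings = []
--     for r, row in enumerate(maze):
--         if r == 0 or r == nrows - 1:
--             cols = range(len(row))
--         elif len(row) > 1:
--             cols = (0, len(row) - 1)
--         elif row:
--             cols = (0,)
--         else:
--             cols = ()
--         for c in cols:
--             if is_opening(r, c, row):
--                 openings.append((r, c))
--     return openings or None
-- ===== Notes on version B (the rewrite author's own statement) =====
-- stated objective: faster
-- what changed: B visits only the perimeter cells directly (all columns of the first/last row, first/last column of middle rows) and decides each opening by an arithmetic bounds check on row lengths, instead of A's building a dict of every cell and scanning the full R*C grid with dict lookups.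
import Mathlib
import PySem

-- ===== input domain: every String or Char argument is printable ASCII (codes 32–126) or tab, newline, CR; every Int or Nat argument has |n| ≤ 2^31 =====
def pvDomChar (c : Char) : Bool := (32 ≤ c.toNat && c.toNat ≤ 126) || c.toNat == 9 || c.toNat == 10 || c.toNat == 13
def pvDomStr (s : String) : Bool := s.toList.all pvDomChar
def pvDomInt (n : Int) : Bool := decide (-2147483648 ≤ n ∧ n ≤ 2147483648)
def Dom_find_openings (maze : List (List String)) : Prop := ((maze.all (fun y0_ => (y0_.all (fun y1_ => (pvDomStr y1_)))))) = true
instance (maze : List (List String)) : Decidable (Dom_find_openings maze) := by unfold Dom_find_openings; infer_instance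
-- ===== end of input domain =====

-- B iterates only the perimeter cells with direct index-and-bounds checks instead of A's
-- full-grid dict build and scan (objective: faster, O(R+C) border work instead of O(R*C)).

-- ===== PORT A =====
def make_dict (maze : List (List String)) : PySem.Dict (Int × Int) String :=
  (PySem.List.enumerate maze).foldl
    (fun d p => (PySem.List.enumerate p.2).foldl (fun d q => d.insert (p.1, q.1) q.2) d)
    PySem.Dict.empty

def find_neighbors (current : Int × Int) (maze_dict : PySem.Dict (Int × Int) String) :
    Option (Int × Int) × Option (Int × Int) :=
  let tile := maze_dict.get? current
  if tile = some "NP" then (none, none)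
  else if tile = some "LR" then (some (current.1, current.2 + 1), some (current.1, current.2 - 1))
  else if tile = some "BT" then (some (current.1 + 1, current.2), some (current.1 - 1, current.2))
  else if tile = some "TL" then (some (current.1 - 1, current.2), some (current.1, current.2 - 1))
  else if tile = some "TR" then (some (current.1 - 1, current.2), some (current.1, current.2 + 1))
  else if tile = some "BR" then (some (current.1 + 1, current.2), some (current.1, current.2 + 1))
  else if tile = some "BL" then (some (current.1 + 1, current.2), some (current.1, current.2 - 1))
  else (none, none)

def find_openings (maze : List (List String)) : Option (List (Int × Int)) :=
  let maze_dict := make_dict maze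
  let openings : List (Int × Int) :=
    (PySem.List.enumerate maze).foldl
      (fun acc p =>
        (PySem.List.enumerate p.2).foldl
          (fun acc q =>
            if p.1 = 0 ∨ p.1 = PySem.List.len maze - 1 then
              if maze_dict.get? (p.1, q.1) = some "NP" then acc
              else
                let nb := find_neighbors (p.1, q.1) maze_dict
                if nb.1.bind maze_dict.get? = none ∨ nb.2.bind maze_dict.get? = none then
                  acc ++ [(p.1, q.1)]
                else acc
            else
              if q.1 = 0 ∨ q.1 = PySem.List.len p.2 - 1 then
                if maze_dict.get? (p.1, q.1) = some "NP" then acc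
                else
                  let nb := find_neighbors (p.1, q.1) maze_dict
                  if nb.1.bind maze_dict.get? = none ∨ nb.2.bind maze_dict.get? = none then
                    acc ++ [(p.1, q.1)]
                  else acc
              else acc)
          acc)
      []
  if openings = [] then none else some openings

-- ===== PORT B =====
def deltasB (tile : String) : Option ((Int × Int) × (Int × Int)) :=
  if tile = "LR" then some ((0, 1), (0, -1))
  else if tile = "BT" then some ((1, 0), (-1, 0))
  else if tile = "TL" then some ((-1, 0), (0, -1))
  else if tile = "TR" then some ((-1, 0), (0, 1))
  else if tile = "BR" then some ((1, 0), (0, 1))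
  else if tile = "BL" then some ((1, 0), (0, -1))
  else none

def inMazeB (maze : List (List String)) (r c : Int) : Bool :=
  decide (0 ≤ r ∧ r < PySem.List.len maze) &&
    decide (0 ≤ c ∧ c < PySem.List.len (PySem.List.pyGetD maze r []))

def isOpeningB (maze : List (List String)) (r c : Int) (row : List String) : Bool :=
  let tile := PySem.List.pyGetD row c ""
  if tile = "NP" then false
  else
    match deltasB tile with
    | none => true
    | some (d1, d2) =>
        !inMazeB maze (r + d1.1) (c + d1.2) || !inMazeB maze (r + d2.1) (c + d2.2)

def find_openings_alt (maze : List (List String)) : Option (List (Int × Int)) :=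
  let nrows := PySem.List.len maze
  let openings : List (Int × Int) :=
    (PySem.List.enumerate maze).foldl
      (fun acc p =>
        let cols : List Int :=
          if p.1 = 0 ∨ p.1 = nrows - 1 then PySem.List.pyRange 0 (PySem.List.len p.2) 1
          else if 1 < PySem.List.len p.2 then [0, PySem.List.len p.2 - 1]
          else if p.2 ≠ [] then [0]
          else []
        cols.foldl (fun acc c => if isOpeningB maze p.1 c p.2 then acc ++ [(p.1, c)] else acc) acc)
      []
  if openings = [] then none else some openings

-- ===== PRECONDITION & SPEC =====
def Spec_find_openings (maze : List (List String)) (out : Option (List (Int × Int))) : Prop := out = find_openings_alt maze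
instance (maze : List (List String)) (out : Option (List (Int × Int))) : Decidable (Spec_find_openings maze out) := by unfold Spec_find_openings; infer_instance

-- ===== CLAIM (what is proved, stated in full; the proofs are below) =====
def Claim_equal_find_openings : Prop := ∀ (maze : List (List String)), Dom_find_openings maze → Spec_find_openings maze (find_openings maze)

-- ===== LEMMAS AND PROOFS =====

-- the cell of the maze at integer coordinates (r, c), none when outside
def cellGet (maze : List (List String)) (r c : Int) : Option String :=
  if 0 ≤ r ∧ 0 ≤ c then (maze[r.toNat]?).bind (fun row => row[c.toNat]?) else none

set_option maxRecDepth 4096 in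
theorem inner_get (row : List String) (s : Int) (d : PySem.Dict (Int × Int) String)
    (ri r c : Int) :
    ((PySem.List.enumerate row s).foldl (fun d q => d.insert (ri, q.1) q.2) d).get? (r, c)
      = match (if r = ri ∧ s ≤ c then row[(c - s).toNat]? else none) with
        | some v => some v
        | none => d.get? (r, c) := by
  induction row generalizing s d with
  | nil => simp [PySem.List.enumerate_nil]
  | cons t ts ih =>
    rw [PySem.List.enumerate_cons]
    simp only [List.foldl_cons]
    rw [ih]
    rw [PySem.Dict.get?_insert]
    rcases eq_or_ne r ri with hri | hri
    · subst hri
      rcases lt_trichotomy c s with h | h | h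
      · have h1 : ¬ (r = r ∧ s + 1 ≤ c) := by omega
        have h2 : ¬ (r = r ∧ s ≤ c) := by omega
        have h3 : ¬ ((r, c) = (r, s)) := by simp; omega
        simp [h3, show ¬ s < c by omega, show ¬ s ≤ c by omega]
      · subst h
        have h1 : ¬ (r = r ∧ c + 1 ≤ c) := by omega
        have h2 : (r = r ∧ c ≤ c) := by omega
        simp
      · have h1 : (r = r ∧ s + 1 ≤ c) := by omega
        have h2 : (r = r ∧ s ≤ c) := by omega
        have h3 : ¬ ((r, c) = (r, s)) := by simp; omega
        have h4 : (c - s).toNat = (c - s - 1).toNat + 1 := by omega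
        rw [show c - (s + 1) = c - s - 1 from by ring]
        simp only [h4, if_neg h3, List.getElem?_cons_succ,
          true_and, if_pos (show s + 1 ≤ c from h1.2), if_pos (show s ≤ c from h2.2)]
    · have h3 : ¬ ((r, c) = (ri, s)) := by simp [hri]
      simp [hri, h3]

set_option maxRecDepth 4096 in
theorem outer_get (maze : List (List String)) (s : Int) (d : PySem.Dict (Int × Int) String)
    (r c : Int) :
    ((PySem.List.enumerate maze s).foldl
        (fun d p => (PySem.List.enumerate p.2).foldl (fun d q => d.insert (p.1, q.1) q.2) d)
        d).get? (r, c)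
      = match (if s ≤ r ∧ 0 ≤ c then
              (maze[(r - s).toNat]?).bind (fun row => row[c.toNat]?) else none) with
        | some v => some v
        | none => d.get? (r, c) := by
  induction maze generalizing s d with
  | nil => simp [PySem.List.enumerate_nil]
  | cons row rest ih =>
    rw [PySem.List.enumerate_cons]
    simp only [List.foldl_cons]
    rw [ih, inner_get]
    rcases lt_trichotomy r s with h | h | h
    · simp [show ¬ s + 1 ≤ r by omega, show ¬ s ≤ r by omega, show ¬ r = s by omega]
    · by_cases hc : 0 ≤ c
      · simp [show ¬ s + 1 ≤ r by omega, show s ≤ r by omega, h, hc,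
          show (r - s).toNat = 0 by omega]
      · simp [hc]
    · rw [show r - (s + 1) = r - s - 1 from by ring]
      by_cases hc : 0 ≤ c
      · simp only [show s ≤ r by omega, show s + 1 ≤ r by omega, hc, and_self, true_and,
          if_pos, show (r - s).toNat = (r - s - 1).toNat + 1 by omega, List.getElem?_cons_succ,
          show ¬ (r = s ∧ 0 ≤ c) from by omega, if_neg, if_true]
        cases rest[(r - s - 1).toNat]?.bind (fun row => row[c.toNat]?) <;> simp [show ¬ r = s by omega]
      · simp [hc]

theorem make_dict_get (maze : List (List String)) (r c : Int) :
    (make_dict maze).get? (r, c) = cellGet maze r c := by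
  unfold make_dict cellGet
  rw [outer_get]
  simp only [PySem.Dict.get?_empty, sub_zero]
  cases h : (if 0 ≤ r ∧ 0 ≤ c then maze[r.toNat]?.bind (fun row => row[c.toNat]?) else none) <;> simp

theorem inMazeB_eq (maze : List (List String)) (r c : Int) :
    inMazeB maze r c = (cellGet maze r c).isSome := by
  unfold inMazeB cellGet
  by_cases hr : 0 ≤ r ∧ r < (maze.length : Int)
  · have hlt : r.toNat < maze.length := by omega
    rw [PySem.List.pyGetD_eq_getElem maze [] hr.1 (by simpa using hr.2)]
    by_cases hc : 0 ≤ c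
    · simp only [PySem.List.len_eq, List.getElem?_eq_getElem hlt, Option.bind_some,
        if_pos (show 0 ≤ r ∧ 0 ≤ c from ⟨hr.1, hc⟩)]
      simp [hr, hc]
      by_cases h2 : c.toNat < maze[r.toNat].length
      · simp [isSome_getElem?, h2, show c < (maze[r.toNat].length : Int) from by omega]
      · simp [isSome_getElem?, h2, show ¬ c < (maze[r.toNat].length : Int) from by omega]
    · simp [show ¬ (0 ≤ r ∧ 0 ≤ c) from by omega, hc]
  · by_cases hr0 : 0 ≤ r
    · have hnone : maze[r.toNat]? = none := by
        rw [List.getElem?_eq_none]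
        omega
      simp [hr, hnone]
    · simp [show ¬ (0 ≤ r ∧ 0 ≤ c) from by omega, hr]

theorem step_eq (maze : List (List String)) (r c : Int) (row : List String) (tile : String)
    (hr : 0 ≤ r) (hc : 0 ≤ c) (hrow : maze[r.toNat]? = some row)
    (htile : row[c.toNat]? = some tile) (acc : List (Int × Int)) :
    (if (make_dict maze).get? (r, c) = some "NP" then acc
     else
       let nb := find_neighbors (r, c) (make_dict maze)
       if nb.1.bind (make_dict maze).get? = none ∨ nb.2.bind (make_dict maze).get? = none then
         acc ++ [(r, c)]
       else acc)
    = (if isOpeningB maze r c row then acc ++ [(r, c)] else acc) := by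
  have hclen : c.toNat < row.length := by
    rcases List.getElem?_eq_some_iff.mp htile with ⟨h, _⟩
    exact h
  have hcell : cellGet maze r c = some tile := by
    unfold cellGet
    simp [hr, hc, hrow, htile]
  have htileD : PySem.List.pyGetD row c "" = tile := by
    rw [PySem.List.pyGetD_eq_getElem row "" hc (by exact_mod_cast by omega)]
    rcases List.getElem?_eq_some_iff.mp htile with ⟨_, h2⟩
    exact h2
  unfold isOpeningB find_neighbors
  simp only [htileD, make_dict_get, hcell]
  by_cases h1 : tile = "NP"
  · simp [h1, deltasB]
  by_cases h2 : tile = "LR"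
  · simp [h1, h2, deltasB, inMazeB_eq, make_dict_get, Option.not_isSome_iff_eq_none, sub_eq_add_neg]
  by_cases h3 : tile = "BT"
  · simp [h1, h2, h3, deltasB, inMazeB_eq, make_dict_get, Option.not_isSome_iff_eq_none, sub_eq_add_neg]
  by_cases h4 : tile = "TL"
  · simp [h1, h2, h3, h4, deltasB, inMazeB_eq, make_dict_get, Option.not_isSome_iff_eq_none, sub_eq_add_neg]
  by_cases h5 : tile = "TR"
  · simp [h1, h2, h3, h4, h5, deltasB, inMazeB_eq, make_dict_get, Option.not_isSome_iff_eq_none, sub_eq_add_neg]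
  by_cases h6 : tile = "BR"
  · simp [h1, h2, h3, h4, h5, h6, deltasB, inMazeB_eq, make_dict_get, Option.not_isSome_iff_eq_none, sub_eq_add_neg]
  by_cases h7 : tile = "BL"
  · simp [h1, h2, h3, h4, h5, h6, h7, deltasB, inMazeB_eq, make_dict_get, Option.not_isSome_iff_eq_none, sub_eq_add_neg]
  · simp [h1, h2, h3, h4, h5, h6, h7, deltasB]

lemma foldl_skip {a' b : Type} (l : List a') (f : b → a' → b) (a : b)
    (h : ∀ acc q, q ∈ l → f acc q = acc) : l.foldl f a = a := by
  induction l generalizing a with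
  | nil => rfl
  | cons q t ih =>
    rw [List.foldl_cons, h a q (by simp)]
    exact ih _ (fun acc q hq => h acc q (by simp [hq]))

-- ===== VERDICT (by name: the statement is the Claim_ definition above) =====
theorem find_openings_spec : Claim_equal_find_openings := by
  intro maze _
  show find_openings maze = find_openings_alt maze
  unfold find_openings find_openings_alt
  dsimp only
  suffices h : ∀ acc : List (Int × Int),
      (PySem.List.enumerate maze).foldl
        (fun acc p =>
          (PySem.List.enumerate p.2).foldl
            (fun acc q =>
              if p.1 = 0 ∨ p.1 = PySem.List.len maze - 1 then
                if (make_dict maze).get? (p.1, q.1) = some "NP" then acc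
                else
                  let nb := find_neighbors (p.1, q.1) (make_dict maze)
                  if nb.1.bind (make_dict maze).get? = none ∨
                      nb.2.bind (make_dict maze).get? = none then
                    acc ++ [(p.1, q.1)]
                  else acc
              else
                if q.1 = 0 ∨ q.1 = PySem.List.len p.2 - 1 then
                  if (make_dict maze).get? (p.1, q.1) = some "NP" then acc
                  else
                    let nb := find_neighbors (p.1, q.1) (make_dict maze)
                    if nb.1.bind (make_dict maze).get? = none ∨
                        nb.2.bind (make_dict maze).get? = none then
                      acc ++ [(p.1, q.1)]
                    else acc
                else acc)
            acc)
        acc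
      = (PySem.List.enumerate maze).foldl
          (fun acc p =>
            let cols : List Int :=
              if p.1 = 0 ∨ p.1 = PySem.List.len maze - 1 then
                PySem.List.pyRange 0 (PySem.List.len p.2) 1
              else if 1 < PySem.List.len p.2 then [0, PySem.List.len p.2 - 1]
              else if p.2 ≠ [] then [0]
              else []
            cols.foldl
              (fun acc c => if isOpeningB maze p.1 c p.2 then acc ++ [(p.1, c)] else acc) acc)
          acc by
    rw [h []]
  intro acc
  apply PySem.List.foldl_congr_mem
  intro acc0 p hp
  rw [PySem.List.mem_enumerate_iff] at hp
  obtain ⟨k, hk, rfl⟩ := hp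
  simp only [zero_add]
  have hrowk : maze[((k : Int)).toNat]? = some maze[k] := by
    simp [List.getElem?_eq_getElem hk]
  by_cases hb : (k : Int) = 0 ∨ (k : Int) = PySem.List.len maze - 1
  · -- border row: every column is visited by both sides
    simp only [if_pos hb]
    rw [PySem.List.enumerate_eq_map_pyRange maze[k] "", List.foldl_map]
    apply PySem.List.foldl_congr_mem
    intro acc1 j hj
    rw [PySem.List.mem_pyRange_one] at hj
    have hjlen : j.toNat < maze[k].length := by
      have := hj.2
      simp [PySem.List.len_eq] at this
      omega
    exact step_eq maze (k : Int) j maze[k] (PySem.List.pyGetD maze[k] j "") (by positivity) hj.1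
      hrowk (by
        rw [PySem.List.pyGetD_eq_getElem maze[k] "" hj.1 (by exact_mod_cast by omega)]
        simp [List.getElem?_eq_getElem hjlen]) acc1
  · -- middle row: only the first and last column can act
    simp only [if_neg hb]
    rcases hrow : maze[k] with _ | ⟨x, xs⟩
    · simp [PySem.List.enumerate_nil, hrow]
    · rcases List.eq_nil_or_concat xs with rfl | ⟨m, y, rfl⟩
      · -- a single-cell row: both sides process column 0 once
        rw [hrow] at hrowk
        simp only [hrow, PySem.List.enumerate_cons, PySem.List.enumerate_nil, List.foldl_cons,
          List.foldl_nil, PySem.List.len_eq, List.length_cons, List.length_nil]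
        rw [if_neg (show ¬ ((1 : Int) < ((0 + 1 : Nat) : Int)) from by omega),
          if_pos (show ([x] : List String) ≠ [] from by simp), List.foldl_cons, List.foldl_nil]
        simp only [true_or, if_true]
        exact step_eq maze (k : Int) 0 [x] x (by positivity) le_rfl hrowk (by simp) acc0
      · -- a row with at least two cells: the middle columns do nothing on the A side
        have hrowk' : maze[((k : Int)).toNat]? = some (x :: (m ++ [y])) := by
          rw [hrowk, hrow]
          simp
        have hlen : PySem.List.len (x :: (m ++ [y])) = (m.length : Int) + 2 := by
          simp [PySem.List.len_eq]
          omega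
        simp only [hrow, List.concat_eq_append, PySem.List.enumerate_cons,
          PySem.List.enumerate_append, List.foldl_cons, List.foldl_append, hlen,
          PySem.List.enumerate_nil, List.foldl_nil]
        rw [show (m.length : Int) + 2 - 1 = (m.length : Int) + 1 from by omega,
          if_pos (show (1 : Int) < (m.length : Int) + 2 from by omega),
          List.foldl_cons, List.foldl_cons, List.foldl_nil]
        simp only [true_or, if_true, zero_add]
        rw [step_eq maze (k : Int) 0 (x :: (m ++ [y])) x (by positivity) le_rfl hrowk' (by simp)
            acc0]
        rw [foldl_skip (PySem.List.enumerate m 1)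
          (fun acc1 (q : Int × String) =>
            if q.1 = 0 ∨ q.1 = (m.length : Int) + 1 then
              if (make_dict maze).get? ((k : Int), q.1) = some "NP" then acc1
              else
                if ((find_neighbors ((k : Int), q.1) (make_dict maze)).1.bind
                      fun a => (make_dict maze).get? a) = none ∨
                    ((find_neighbors ((k : Int), q.1) (make_dict maze)).2.bind
                      fun a => (make_dict maze).get? a) = none then
                  acc1 ++ [((k : Int), q.1)]
                else acc1
            else acc1)
          _
          (by
            intro acc1 q hq
            rw [PySem.List.mem_enumerate_iff] at hq
            obtain ⟨i, hi, rfl⟩ := hq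
            have hno : ¬ ((1 + (i : Int)) = 0 ∨ (1 + (i : Int)) = (m.length : Int) + 1) := by
              omega
            simp [hno])]
        rw [show (1 : Int) + (m.length : Int) = (m.length : Int) + 1 from by ring,
          if_pos (Or.inr rfl : ((m.length : Int) + 1) = 0 ∨
            ((m.length : Int) + 1) = (m.length : Int) + 1)]
        exact step_eq maze (k : Int) ((m.length : Int) + 1) (x :: (m ++ [y])) y (by positivity)
          (by positivity) hrowk'
          (by
            rw [show (((m.length : Int) + 1)).toNat = m.length + 1 from by omega]
            simp [List.getElem?_concat_length])
          _
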